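-- pv_equiv track=rewrite | github.com/xys234/coding-problems | algo/dp/minimum_cost_merge_stones.py | mergeStones_optimized
-- ===== SOURCE A (Python) =====
-- from functools import lru_cache
--
-- def mergeStones_optimized(stones, K):
--     n = len(stones)
--     if (n - 1) % (K - 1): return -1
--
--     prefix = [0] * (n + 1)
--     for i in range(n): prefix[i + 1] = prefix[i] + stones[i]
--
--     @lru_cache(None)
--     def dp(i, j):  # cost to merge [i, j]
--         if j - i + 1 < K: return 0
--
--         ret = min(dp(i, mid) + dp(mid + 1, j) for mid in range(i, j, K - 1))
--
--         if (j - i) % (K - 1) == 0: ret += prefix[j + 1] - prefix[i]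
--
--         return ret
--
--     return dp(0, n - 1)
-- ===== SOURCE B (Python) =====
-- def mergeStones_optimized(stones, K):
--     n = len(stones)
--     if (n - 1) % (K - 1):
--         return -1
--
--     prefix = [0]
--     for x in stones:
--         prefix.append(prefix[-1] + x)
--
--     # bottom-up tabulation over interval length; absent entries mean cost 0
--     dp = {}
--     for length in range(K, n + 1):
--         for i in range(0, n - length + 1):
--             j = i + length - 1
--             best = min(dp.get((i, mid), 0) + dp.get((mid + 1, j), 0)
--                        for mid in range(i, j, K - 1))
--             if (j - i) % (K - 1) == 0:
--                 best += prefix[j + 1] - prefix[i]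
--             dp[(i, j)] = best
--     return dp.get((0, n - 1), 0)
-- ===== Notes on version B (the rewrite author's own statement) =====
-- stated objective: alternative
-- what changed: Replaced the lru_cache-memoized top-down recursion by bottom-up tabulation: a dictionary dp table filled by looping over interval lengths from K to n (absent entries standing for the 0-cost base cases), keeping the (n-1)%(K-1) guard, prefix sums and the K-1 mid-step identical.
import Mathlib
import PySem

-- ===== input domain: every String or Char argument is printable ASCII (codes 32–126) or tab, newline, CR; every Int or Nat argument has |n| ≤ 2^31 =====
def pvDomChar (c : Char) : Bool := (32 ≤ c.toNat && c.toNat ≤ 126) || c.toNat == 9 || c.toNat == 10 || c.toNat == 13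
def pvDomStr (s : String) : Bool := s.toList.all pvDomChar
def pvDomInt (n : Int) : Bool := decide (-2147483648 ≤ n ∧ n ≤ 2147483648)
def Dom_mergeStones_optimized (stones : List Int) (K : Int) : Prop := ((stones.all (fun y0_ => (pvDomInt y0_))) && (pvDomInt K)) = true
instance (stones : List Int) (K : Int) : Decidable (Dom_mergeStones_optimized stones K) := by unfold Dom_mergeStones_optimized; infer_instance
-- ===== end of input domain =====

-- B replaces A's memoized top-down recursion by bottom-up tabulation over interval lengths
-- (a dict table, absent entries = 0-cost base cases); same guard, prefix sums and mid-step.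


-- ===== PORT A =====
-- prefix[0]=0; prefix[i+1] = prefix[i] + stones[i]  (running-sum transcription of A's fill loop)
def prefScanA : List Int → Int → List Int
  | [], s => [s]
  | x :: t, s => s :: prefScanA t (s + x)

-- A's @lru_cache dp(i, j), with a fuel counter as totality guard only (memoization does not change the value)
def dpA (pre : List Int) (K : Int) : Nat → Int → Int → Int
  | 0, _, _ => 0
  | f + 1, i, j =>
    if j - i + 1 < K then 0
    else
      let ret := (PySem.List.min? ((PySem.List.pyRange i j (K - 1)).map
          (fun mid => dpA pre K f i mid + dpA pre K f (mid + 1) j)) (fun y => y)).getD 0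
      if PySem.Int.mod (j - i) (K - 1) == 0
      then ret + (PySem.List.pyGetD pre (j + 1) 0 - PySem.List.pyGetD pre i 0)
      else ret

def mergeStones_optimized (stones : List Int) (K : Int) : Int :=
  let n : Int := stones.length
  if PySem.Int.mod (n - 1) (K - 1) == 0 then
    dpA (prefScanA stones 0) K stones.length 0 (n - 1)
  else -1

-- ===== PORT B =====
-- B's prefix loop: prefix = [0]; for x in stones: prefix.append(prefix[-1] + x)
def prefScanB (stones : List Int) : List Int :=
  stones.foldl (fun acc x => acc ++ [PySem.List.pyGetD acc (-1) 0 + x]) [0]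

-- the body of B's inner loop: best for interval [i, j]
def bCell (pre : List Int) (K : Int) (d : PySem.Dict (Int × Int) Int) (i j : Int) : Int :=
  let best := (PySem.List.min? ((PySem.List.pyRange i j (K - 1)).map
      (fun mid => d.getD (i, mid) 0 + d.getD (mid + 1, j) 0)) (fun y => y)).getD 0
  if PySem.Int.mod (j - i) (K - 1) == 0
  then best + (PySem.List.pyGetD pre (j + 1) 0 - PySem.List.pyGetD pre i 0)
  else best

-- B's inner loop over i for one interval length
def bInner (pre : List Int) (K n length : Int) (d : PySem.Dict (Int × Int) Int) :
    PySem.Dict (Int × Int) Int :=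
  (PySem.List.pyRange 0 (n - length + 1) 1).foldl
    (fun d i => d.insert (i, i + length - 1) (bCell pre K d i (i + length - 1))) d

def mergeStones_optimized_alt (stones : List Int) (K : Int) : Int :=
  let n : Int := stones.length
  if PySem.Int.mod (n - 1) (K - 1) == 0 then
    let pre := prefScanB stones
    let dp := (PySem.List.pyRange K (n + 1) 1).foldl
      (fun d length => bInner pre K n length d) PySem.Dict.empty
    dp.getD (0, n - 1) 0
  else -1

-- ===== PRECONDITION & SPEC =====
-- Pre_ excludes only inputs where A raises: K = 1 (ZeroDivisionError in (n-1)%(K-1)) and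
-- K ≤ 0 inputs on which that guard passes, where A's min() over an empty range raises ValueError.
def Pre_mergeStones_optimized (stones : List Int) (K : Int) : Prop :=
  2 ≤ K ∨ (K ≤ 0 ∧ PySem.Int.mod ((stones.length : Int) - 1) (K - 1) ≠ 0)
instance (stones : List Int) (K : Int) : Decidable (Pre_mergeStones_optimized stones K) := by
  unfold Pre_mergeStones_optimized; infer_instance

def pvWitness_mergeStones_optimized : List Int × Int := ([3, 2, 4, 1], 2)

def Spec_mergeStones_optimized (stones : List Int) (K : Int) (out : Int) : Prop := out = mergeStones_optimized_alt stones K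
instance (stones : List Int) (K : Int) (out : Int) : Decidable (Spec_mergeStones_optimized stones K out) := by unfold Spec_mergeStones_optimized; infer_instance

-- ===== CLAIM (what is proved, stated in full; the proofs are below) =====
def Claim_equal_mergeStones_optimized : Prop := ∀ (stones : List Int) (K : Int), Dom_mergeStones_optimized stones K → Pre_mergeStones_optimized stones K → Spec_mergeStones_optimized stones K (mergeStones_optimized stones K)

-- ===== LEMMAS AND PROOFS =====

lemma pyGetD_append_singleton_neg_one (l : List Int) (s : Int) :
    PySem.List.pyGetD (l ++ [s]) (-1) 0 = s := by
  simp [PySem.List.pyGetD, PySem.List.pyGet?, PySem.List.pyIdx?]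

lemma prefFold (xs : List Int) : ∀ (acc : List Int) (s : Int),
    xs.foldl (fun acc x => acc ++ [PySem.List.pyGetD acc (-1) 0 + x]) (acc ++ [s]) =
      acc ++ prefScanA xs s := by
  induction xs with
  | nil => intro acc s; simp [prefScanA]
  | cons x t ih =>
    intro acc s
    simp only [List.foldl_cons, pyGetD_append_singleton_neg_one]
    have h := ih (acc ++ [s]) (s + x)
    simpa [prefScanA] using h

-- B's append-based prefix loop builds the same list as A's fill loop
lemma prefScanB_eq (stones : List Int) : prefScanB stones = prefScanA stones 0 := by
  have h := prefFold stones [] 0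
  simpa [prefScanB] using h

-- intervals shorter than K cost 0 at any fuel
lemma dpA_small (pre : List Int) (K : Int) (g : Nat) (i j : Int) (h : j - i + 1 < K) :
    dpA pre K g i j = 0 := by
  cases g with
  | zero => simp [dpA]
  | succ g => simp [dpA, h]

-- dpA is fuel-independent once the fuel covers the interval span (K ≥ 2)
lemma dpA_fuel (pre : List Int) (K : Int) (hK : 2 ≤ K) :
    ∀ (f : Nat) (i j : Int), (j - i + 1).toNat ≤ f →
      dpA pre K f i j = dpA pre K (j - i + 1).toNat i j := by
  intro f
  induction f using Nat.strong_induction_on with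
  | _ f IH =>
    intro i j hf
    by_cases hs : j - i + 1 < K
    · rw [dpA_small pre K _ _ _ hs, dpA_small pre K _ _ _ hs]
    · have h2 : 2 ≤ j - i + 1 := le_trans hK (not_lt.1 hs)
      have ht : (j - i + 1).toNat = (j - i).toNat + 1 := by omega
      obtain ⟨f', rfl⟩ : ∃ f', f = f' + 1 := ⟨f - 1, by omega⟩
      have hcanon : ∀ g : Nat, (j - i).toNat ≤ g → g < f' + 1 →
          (PySem.List.pyRange i j (K - 1)).map
            (fun mid => dpA pre K g i mid + dpA pre K g (mid + 1) j) =
          (PySem.List.pyRange i j (K - 1)).map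
            (fun mid => dpA pre K (mid - i + 1).toNat i mid +
                        dpA pre K (j - (mid + 1) + 1).toNat (mid + 1) j) := by
        intro g hg hglt
        apply List.map_congr_left
        intro mid hmid
        rw [PySem.List.mem_pyRange_iff_of_pos (by omega)] at hmid
        obtain ⟨him, hmj, -⟩ := hmid
        have e1 := IH g (by omega) i mid (by omega)
        have e2 := IH g (by omega) (mid + 1) j (by omega)
        rw [e1, e2]
      rw [ht]
      simp only [dpA, if_neg hs]
      rw [hcanon f' (by omega) (by omega), hcanon (j - i).toNat (le_refl _) (by omega)]
-- the table invariant: entries of span ≤ L hold dp's value on valid in-range intervals, 0 elsewhere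
def FullInv (pre : List Int) (K n L : Int) (d : PySem.Dict (Int × Int) Int) : Prop :=
  ∀ i j : Int, d.getD (i, j) 0 =
    if 0 ≤ i ∧ j ≤ n - 1 ∧ K ≤ j - i + 1 ∧ j - i + 1 ≤ L
    then dpA pre K (j - i + 1).toNat i j else 0

-- invariant during B's inner loop at length L: rows i < a of span L are already filled
def InnerInv (pre : List Int) (K n L a : Int) (d : PySem.Dict (Int × Int) Int) : Prop :=
  ∀ i j : Int, d.getD (i, j) 0 =
    if 0 ≤ i ∧ j ≤ n - 1 ∧ K ≤ j - i + 1 ∧ (j - i + 1 ≤ L - 1 ∨ (j - i + 1 = L ∧ i < a))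
    then dpA pre K (j - i + 1).toNat i j else 0

-- the cell B computes at (a, a+L-1) is exactly dp's value there
lemma bCell_eq (pre : List Int) (K n L a : Int) (hK : 2 ≤ K) (hKL : K ≤ L)
    (ha : 0 ≤ a) (hj : a + L - 1 ≤ n - 1)
    (d : PySem.Dict (Int × Int) Int) (hd : InnerInv pre K n L a d) :
    bCell pre K d a (a + L - 1) = dpA pre K L.toNat a (a + L - 1) := by
  have hLt : L.toNat = (L - 1).toNat + 1 := by omega
  have hs : ¬ (a + L - 1 - a + 1 < K) := by omega
  have hmap : (PySem.List.pyRange a (a + L - 1) (K - 1)).map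
        (fun mid => d.getD (a, mid) 0 + d.getD (mid + 1, a + L - 1) 0) =
      (PySem.List.pyRange a (a + L - 1) (K - 1)).map
        (fun mid => dpA pre K (L - 1).toNat a mid +
                    dpA pre K (L - 1).toNat (mid + 1) (a + L - 1)) := by
    apply List.map_congr_left
    intro mid hmid
    rw [PySem.List.mem_pyRange_iff_of_pos (by omega)] at hmid
    obtain ⟨ham, hmj, -⟩ := hmid
    have e1 : d.getD (a, mid) 0 = dpA pre K (L - 1).toNat a mid := by
      rw [hd a mid]
      by_cases hsp : K ≤ mid - a + 1
      · rw [if_pos (by omega)]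
        exact (dpA_fuel pre K hK (L - 1).toNat a mid (by omega)).symm
      · rw [if_neg (by omega), dpA_small pre K _ _ _ (by omega)]
    have e2 : d.getD (mid + 1, a + L - 1) 0 = dpA pre K (L - 1).toNat (mid + 1) (a + L - 1) := by
      rw [hd (mid + 1) (a + L - 1)]
      by_cases hsp : K ≤ a + L - 1 - (mid + 1) + 1
      · rw [if_pos (by omega)]
        exact (dpA_fuel pre K hK (L - 1).toNat (mid + 1) (a + L - 1) (by omega)).symm
      · rw [if_neg (by omega), dpA_small pre K _ _ _ (by omega)]
    rw [e1, e2]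
  rw [hLt]
  simp only [bCell, dpA, if_neg hs]
  rw [hmap]

-- inserting row a's cell advances the inner invariant from a to a+1
lemma innerInv_insert (pre : List Int) (K n L a : Int) (hK : 2 ≤ K) (hKL : K ≤ L)
    (ha : 0 ≤ a) (hj : a + L - 1 ≤ n - 1)
    (d : PySem.Dict (Int × Int) Int) (hd : InnerInv pre K n L a d) :
    InnerInv pre K n L (a + 1)
      (d.insert (a, a + L - 1) (bCell pre K d a (a + L - 1))) := by
  intro i j
  rw [PySem.Dict.getD_insert]
  by_cases hk : (i, j) = (a, a + L - 1)
  · obtain ⟨h1, h2⟩ : i = a ∧ j = a + L - 1 := by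
      simpa [Prod.ext_iff] using hk
    rw [if_pos hk, if_pos (by omega), h1, h2]
    have he : (a + L - 1 - a + 1).toNat = L.toNat := by omega
    rw [he]
    exact bCell_eq pre K n L a hK hKL ha hj d hd
  · rw [if_neg hk, hd i j]
    have hne : i ≠ a ∨ j ≠ a + L - 1 := by
      by_contra h
      push Not at h
      exact hk (by simp [h.1, h.2])
    split_ifs with h1 h2 h2 <;> first | rfl | (exfalso; omega)

-- running B's inner loop from row a establishes the invariant at row n-L+1
lemma bInner_go (pre : List Int) (K n L : Int) (hK : 2 ≤ K) (hKL : K ≤ L) :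
    ∀ (c : Nat) (a : Int) (d : PySem.Dict (Int × Int) Int), 0 ≤ a →
      (n - L + 1 - a).toNat = c → InnerInv pre K n L a d →
      InnerInv pre K n L (n - L + 1)
        ((PySem.List.pyRange a (n - L + 1) 1).foldl
          (fun d i => d.insert (i, i + L - 1) (bCell pre K d i (i + L - 1))) d) := by
  intro c
  induction c with
  | zero =>
    intro a d ha hc hd
    rw [PySem.List.pyRange_one_eq_nil (by omega)]
    intro i j
    rw [List.foldl_nil, hd i j]
    split_ifs with h1 h2 h2 <;> first | rfl | (exfalso; omega)
  | succ c ih =>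
    intro a d ha hc hd
    have halt : a < n - L + 1 := by omega
    rw [PySem.List.pyRange_one_cons halt, List.foldl_cons]
    exact ih (a + 1) _ (by omega) (by omega)
      (innerInv_insert pre K n L a hK hKL ha (by omega) d hd)

lemma bInner_inv (pre : List Int) (K n L : Int) (hK : 2 ≤ K) (hKL : K ≤ L)
    (d : PySem.Dict (Int × Int) Int) (hd : FullInv pre K n (L - 1) d) :
    FullInv pre K n L (bInner pre K n L d) := by
  unfold bInner
  by_cases hr : n - L + 1 ≤ 0
  · rw [PySem.List.pyRange_one_eq_nil (by omega)]
    intro i j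
    rw [List.foldl_nil, hd i j]
    split_ifs with h1 h2 h2 <;> first | rfl | (exfalso; omega)
  · have h0 : InnerInv pre K n L 0 d := by
      intro i j
      rw [hd i j]
      split_ifs with h1 h2 h2 <;> first | rfl | (exfalso; omega)
    have h := bInner_go pre K n L hK hKL (n - L + 1 - 0).toNat 0 d le_rfl rfl h0
    intro i j
    rw [h i j]
    split_ifs with h1 h2 h2 <;> first | rfl | (exfalso; omega)

lemma bTable_inv (pre : List Int) (K n : Int) (hK : 2 ≤ K) :
    FullInv pre K n n
      ((PySem.List.pyRange K (n + 1) 1).foldl (fun d length => bInner pre K n length d)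
        PySem.Dict.empty) := by
  have main : ∀ M : Int, K - 1 ≤ M →
      FullInv pre K n M
        ((PySem.List.pyRange K (M + 1) 1).foldl (fun d length => bInner pre K n length d)
          PySem.Dict.empty) := by
    intro M hM
    induction M, hM using Int.le_induction with
    | base =>
      rw [PySem.List.pyRange_one_eq_nil (by omega)]
      intro i j
      rw [List.foldl_nil, PySem.Dict.getD_empty]
      split_ifs with h1 <;> first | rfl | (exfalso; omega)
    | succ M hM ih =>
      rw [PySem.List.pyRange_one_succ_right (by omega), List.foldl_append, List.foldl_cons,
        List.foldl_nil]
      have : M + 1 - 1 = M := by omega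
      exact bInner_inv pre K n (M + 1) hK (by omega) _ (by rwa [this])
  by_cases hKn : K - 1 ≤ n
  · exact main n hKn
  · rw [PySem.List.pyRange_one_eq_nil (by omega)]
    intro i j
    rw [List.foldl_nil, PySem.Dict.getD_empty]
    split_ifs with h1 <;> first | rfl | (exfalso; omega)

-- ===== VERDICT (by name: the statement is the Claim_ definition above) =====
theorem mergeStones_optimized_spec : Claim_equal_mergeStones_optimized := by
  intro stones K hDom hPre
  unfold Spec_mergeStones_optimized mergeStones_optimized mergeStones_optimized_alt
  by_cases hmod : PySem.Int.mod ((stones.length : Int) - 1) (K - 1) == 0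
  · have hK : 2 ≤ K := by
      rcases hPre with h | ⟨-, h⟩
      · exact h
      · exact absurd (by simpa using hmod) h
    simp only [if_pos hmod]
    rw [prefScanB_eq]
    rw [bTable_inv (prefScanA stones 0) K (stones.length : Int) hK 0 ((stones.length : Int) - 1)]
    by_cases hKn : K ≤ (stones.length : Int)
    · rw [if_pos (by omega)]
      have h : ((stones.length : Int) - 1 - 0 + 1).toNat = stones.length := by omega
      rw [h]
    · rw [if_neg (by omega)]
      exact dpA_small _ _ _ _ _ (by omega)
  · simp only [if_neg hmod]
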